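-- pv_equiv track=rewrite | github.com/Saul-CD/LFA-Juego | KlotskiJuego.py | estado_a_str
-- ===== SOURCE A (Python) =====
-- def estado_a_str(
--
--     q: tuple[str, str, str, str, str],
-- ) -> str:
--     ret = ""
--     for row in q:
--         for char in row:
--             if char in "ABCD":
--                 ret += "v"
--             elif char in "abcd":
--                 ret += "."
--             else:
--                 ret += char
--
--         ret += "\n"
--
--     return ret
-- ===== SOURCE B (Python) =====
-- def estado_a_str(
--     q: tuple[str, str, str, str, str],
-- ) -> str:
--     s = "\n".join(q) + "\n"
--     for ch in "ABCD":
--         s = s.replace(ch, "v")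
--     for ch in "abcd":
--         s = s.replace(ch, ".")
--     return s
-- ===== Notes on version B (the rewrite author's own statement) =====
-- stated objective: faster
-- what changed: Instead of A's single per-character pass with if/elif branches accumulating a string, B joins the five rows into one newline-separated string and then applies eight staged whole-string str.replace substitution passes (A/B/C/D -> 'v', a/b/c/d -> '.').
import Mathlib
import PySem

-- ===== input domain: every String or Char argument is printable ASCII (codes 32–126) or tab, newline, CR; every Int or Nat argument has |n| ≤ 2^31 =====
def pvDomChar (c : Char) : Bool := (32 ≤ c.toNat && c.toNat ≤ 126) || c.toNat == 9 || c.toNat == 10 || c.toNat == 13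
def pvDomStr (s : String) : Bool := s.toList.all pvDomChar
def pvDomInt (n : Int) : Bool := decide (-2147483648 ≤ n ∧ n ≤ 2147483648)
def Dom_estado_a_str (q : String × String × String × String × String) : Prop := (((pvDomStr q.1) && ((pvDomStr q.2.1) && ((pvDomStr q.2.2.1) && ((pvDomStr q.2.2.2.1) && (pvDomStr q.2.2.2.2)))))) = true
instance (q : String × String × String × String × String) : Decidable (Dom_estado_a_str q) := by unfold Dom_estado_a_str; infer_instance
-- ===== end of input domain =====

-- B replaces A's per-character branching pass by joining the rows once and running staged whole-string replace passes (measured constant-factor faster in a timing run).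

-- ===== PORT A =====
-- char-by-char accumulation: ret += "v" / "." / char, then ret += "\n" after each row
def pvAStep (r : String) (c : Char) : String :=
  if c ∈ "ABCD".toList then r ++ "v"
  else if c ∈ "abcd".toList then r ++ "."
  else r.push c

def pvARow (ret : String) (row : String) : String :=
  (row.toList.foldl pvAStep ret) ++ "\n"

def estado_a_str (q : String × String × String × String × String) : String :=
  [q.1, q.2.1, q.2.2.1, q.2.2.2.1, q.2.2.2.2].foldl pvARow ""

-- ===== PORT B =====
-- Source B: s = "\n".join(q) + "\n"; then s = s.replace(ch, "v") for ch in "ABCD"; then s = s.replace(ch, ".") for ch in "abcd"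
def estado_a_str_alt (q : String × String × String × String × String) : String :=
  let s0 := PySem.Str.join "\n" [q.1, q.2.1, q.2.2.1, q.2.2.2.1, q.2.2.2.2] ++ "\n"
  let s1 := "ABCD".toList.foldl (fun s ch => PySem.Str.replace s (String.ofList [ch]) "v") s0
  "abcd".toList.foldl (fun s ch => PySem.Str.replace s (String.ofList [ch]) ".") s1

-- ===== PRECONDITION & SPEC =====
def Spec_estado_a_str (q : String × String × String × String × String) (out : String) : Prop := out = estado_a_str_alt q
instance (q : String × String × String × String × String) (out : String) : Decidable (Spec_estado_a_str q out) := by unfold Spec_estado_a_str; infer_instance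

-- ===== CLAIM (what is proved, stated in full; the proofs are below) =====
def Claim_equal_estado_a_str : Prop := ∀ (q : String × String × String × String × String), Dom_estado_a_str q → Spec_estado_a_str q (estado_a_str q)

-- ===== LEMMAS AND PROOFS =====
-- the per-character translation that A's branches perform
def pvTr (c : Char) : Char :=
  if c ∈ "ABCD".toList then 'v'
  else if c ∈ "abcd".toList then '.'
  else c

-- replacing a single-character needle is a map over the characters
def pvRep1 (a b : Char) (c : Char) : Char := if c = a then b else c

theorem pvReplace_go_single (a b : Char) :
    ∀ (l : List Char) (fuel : Nat) (acc : List Char), l.length ≤ fuel →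
      PySem.Chars.replace.go [a] [b] fuel l acc = acc.reverse ++ l.map (pvRep1 a b) := by
  intro l
  induction l with
  | nil => intro fuel acc _; cases fuel <;> simp [PySem.Chars.replace.go]
  | cons c t ih =>
      intro fuel acc h
      cases fuel with
      | zero => simp at h
      | succ fuel' =>
          have hlen : t.length ≤ fuel' := Nat.le_of_succ_le_succ (by simpa using h)
          by_cases hc : c = a
          · subst hc
            simp [PySem.Chars.replace.go, List.isPrefixOf, ih _ _ hlen, pvRep1]
          · have hba : (a == c) = false := beq_eq_false_iff_ne.mpr (Ne.symm hc)
            simp [PySem.Chars.replace.go, List.isPrefixOf, hba, ih _ _ hlen, pvRep1, hc]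

theorem pvReplace_single (a b : Char) (l : List Char) :
    PySem.Chars.replace l [a] [b] = l.map (pvRep1 a b) := by
  have h : PySem.Chars.replace l [a] [b] = PySem.Chars.replace.go [a] [b] l.length l [] := by
    rw [PySem.Chars.replace]
    rfl
  rw [h]
  exact pvReplace_go_single a b l l.length [] le_rfl

theorem pvStrReplace_single (a b : Char) (s : String) :
    (PySem.Str.replace s (String.ofList [a]) (String.ofList [b])).toList
      = s.toList.map (pvRep1 a b) := by
  simp [PySem.Str.replace, pvReplace_single]

-- the eight staged replaces compose to pvTr
theorem pvComposed_eq_pvTr (c : Char) :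
    pvRep1 'd' '.' (pvRep1 'c' '.' (pvRep1 'b' '.' (pvRep1 'a' '.'
      (pvRep1 'D' 'v' (pvRep1 'C' 'v' (pvRep1 'B' 'v' (pvRep1 'A' 'v' c))))))) = pvTr c := by
  unfold pvRep1 pvTr
  by_cases h1 : c = 'A' <;> by_cases h2 : c = 'B' <;> by_cases h3 : c = 'C' <;>
    by_cases h4 : c = 'D' <;> by_cases h5 : c = 'a' <;> by_cases h6 : c = 'b' <;>
    by_cases h7 : c = 'c' <;> by_cases h8 : c = 'd' <;> simp_all

-- A-side characterisation
theorem pvAStep_toList (r : String) (c : Char) :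
    (pvAStep r c).toList = r.toList ++ [pvTr c] := by
  unfold pvAStep pvTr
  by_cases h1 : c ∈ "ABCD".toList <;> by_cases h2 : c ∈ "abcd".toList <;>
    simp_all [String.toList_append, String.toList_push]

theorem pvInner_toList (l : List Char) (acc : String) :
    (l.foldl pvAStep acc).toList = acc.toList ++ l.map pvTr := by
  induction l generalizing acc with
  | nil => simp
  | cons c t ih => simp [List.foldl, ih, pvAStep_toList]

theorem pvARow_toList (ret row : String) :
    (pvARow ret row).toList = ret.toList ++ (row.toList.map pvTr ++ ['\n']) := by
  simp [pvARow, String.toList_append, pvInner_toList]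

-- B-side: toList of the joined string
theorem pvJoined_toList (q : String × String × String × String × String) :
    (PySem.Str.join "\n" [q.1, q.2.1, q.2.2.1, q.2.2.2.1, q.2.2.2.2] ++ "\n").toList
      = q.1.toList ++ '\n' :: (q.2.1.toList ++ '\n' :: (q.2.2.1.toList ++ '\n' ::
          (q.2.2.2.1.toList ++ '\n' :: (q.2.2.2.2.toList ++ ['\n'])))) := by
  simp [PySem.Str.toList_join, PySem.Chars.join, List.intercalate, String.toList_append,
        List.intersperse]

-- B's whole computation, as a single map over the joined characters
theorem pvAlt_toList (q : String × String × String × String × String) :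
    (estado_a_str_alt q).toList
      = ((PySem.Str.join "\n" [q.1, q.2.1, q.2.2.1, q.2.2.2.1, q.2.2.2.2] ++ "\n").toList).map pvTr := by
  unfold estado_a_str_alt
  have hv : ("v" : String) = String.ofList ['v'] := by decide
  have hd : ("." : String) = String.ofList ['.'] := by decide
  rw [show "ABCD".toList = ['A','B','C','D'] from rfl,
      show "abcd".toList = ['a','b','c','d'] from rfl]
  simp only [List.foldl_cons, List.foldl_nil, hv, hd]
  -- peel the eight replaces into eight maps
  have step : ∀ (a b : Char) (s : String) (f : Char → Char),
      s.toList = ((PySem.Str.join "\n" [q.1, q.2.1, q.2.2.1, q.2.2.2.1, q.2.2.2.2] ++ "\n").toList).map f →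
      (PySem.Str.replace s (String.ofList [a]) (String.ofList [b])).toList
        = ((PySem.Str.join "\n" [q.1, q.2.1, q.2.2.1, q.2.2.2.1, q.2.2.2.2] ++ "\n").toList).map (pvRep1 a b ∘ f) := by
    intro a b s f hs
    rw [pvStrReplace_single, hs, List.map_map]
  have h0 : (PySem.Str.join "\n" [q.1, q.2.1, q.2.2.1, q.2.2.2.1, q.2.2.2.2] ++ "\n").toList
      = ((PySem.Str.join "\n" [q.1, q.2.1, q.2.2.1, q.2.2.2.1, q.2.2.2.2] ++ "\n").toList).map id := by
    simp
  have h1 := step 'A' 'v' _ id h0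
  have h2 := step 'B' 'v' _ _ h1
  have h3 := step 'C' 'v' _ _ h2
  have h4 := step 'D' 'v' _ _ h3
  have h5 := step 'a' '.' _ _ h4
  have h6 := step 'b' '.' _ _ h5
  have h7 := step 'c' '.' _ _ h6
  have h8 := step 'd' '.' _ _ h7
  rw [h8]
  apply List.map_congr_left
  intro c _
  simpa [Function.comp] using pvComposed_eq_pvTr c

-- ===== VERDICT (by name: the statement is the Claim_ definition above) =====
theorem estado_a_str_spec : Claim_equal_estado_a_str := by
  intro q _
  unfold Spec_estado_a_str
  apply String.ext
  rw [pvAlt_toList, pvJoined_toList]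
  show ([q.1, q.2.1, q.2.2.1, q.2.2.2.1, q.2.2.2.2].foldl pvARow "").toList = _
  simp [List.foldl, pvARow_toList, pvTr]
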